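-- pv_equiv track=rewrite | github.com/AndreyFerral/MethodsOptimization | artificia_basis.py | is_unit
-- ===== SOURCE A (Python) =====
-- def is_unit(list_for_check):
--     is_unit = False
--     for i in range(len(list_for_check)):
--         # Если находится цифра 1 (должна быть одна)
--         if list_for_check[i] == 1:
--             if not is_unit: is_unit = True
--             else: return False
--         # Единичный вектор должен состоять из 0 и 1
--         if list_for_check[i] != 0 and list_for_check[i] != 1:
--             return False
--
--     # Возвращаем результат в зависимости от is_unit
--     if is_unit: return True
--     else: return False
-- ===== SOURCE B (Python) =====
-- def is_unit(list_for_check):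
--     # validate-then-aggregate: all entries 0/1, then exactly one 1 via sum
--     if not all(x == 0 or x == 1 for x in list_for_check):
--         return False
--     return sum(list_for_check) == 1
-- ===== Notes on version B (the rewrite author's own statement) =====
-- stated objective: simpler
-- what changed: Replaces the single-pass boolean-flag scan with early exits by a validate-then-aggregate structure: first all() checks every element is 0 or 1, then sum(list) == 1 decides the result in closed form.
import Mathlib
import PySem

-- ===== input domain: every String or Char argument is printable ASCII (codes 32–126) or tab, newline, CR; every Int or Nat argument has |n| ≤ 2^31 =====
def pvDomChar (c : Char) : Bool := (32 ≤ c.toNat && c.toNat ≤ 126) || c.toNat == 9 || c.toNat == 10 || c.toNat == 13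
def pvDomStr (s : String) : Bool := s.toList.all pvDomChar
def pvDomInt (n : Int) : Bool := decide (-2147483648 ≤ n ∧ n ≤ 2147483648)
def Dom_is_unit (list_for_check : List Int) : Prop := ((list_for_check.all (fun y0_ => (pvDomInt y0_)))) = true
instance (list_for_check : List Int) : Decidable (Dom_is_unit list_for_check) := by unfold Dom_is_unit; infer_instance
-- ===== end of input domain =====

-- B replaces A's one-pass boolean-flag scan by validate (all 0/1) then aggregate (sum == 1); objective: simpler.

-- ===== PORT A =====
-- The for-loop over indices with the mutable flag `is_unit` becomes structural
-- recursion over the list carrying the flag; branch order and returns preserved.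
def isUnitLoopA (xs : List Int) (flag : Bool) : Bool :=
  match xs with
  | [] => flag
  | x :: rest =>
    if x = 1 then
      if !flag then
        -- flag set to true; the second Python `if` cannot fire since x = 1
        isUnitLoopA rest true
      else false
    else
      if x ≠ 0 ∧ x ≠ 1 then false
      else isUnitLoopA rest flag

def is_unit (list_for_check : List Int) : Bool :=
  isUnitLoopA list_for_check false

-- ===== PORT B =====
def is_unit_alt (list_for_check : List Int) : Bool :=
  if list_for_check.all (fun x => x == 0 || x == 1) then
    decide (list_for_check.sum = 1)
  else false

-- ===== PRECONDITION & SPEC =====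
def Spec_is_unit (list_for_check : List Int) (out : Bool) : Prop := out = is_unit_alt list_for_check
instance (list_for_check : List Int) (out : Bool) : Decidable (Spec_is_unit list_for_check out) := by unfold Spec_is_unit; infer_instance

-- ===== CLAIM (what is proved, stated in full; the proofs are below) =====
def Claim_equal_is_unit : Prop := ∀ (list_for_check : List Int), Dom_is_unit list_for_check → Spec_is_unit list_for_check (is_unit list_for_check)

-- ===== LEMMAS AND PROOFS =====

-- A's loop computes: all elements in {0,1} and (#ones + flag) = 1.
theorem isUnitLoopA_eq (xs : List Int) (flag : Bool) :
    isUnitLoopA xs flag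
      = (xs.all (fun x => x == 0 || x == 1)
          && decide (xs.count 1 + (if flag then 1 else 0) = 1)) := by
  induction xs generalizing flag with
  | nil => cases flag <;> simp [isUnitLoopA]
  | cons x rest ih =>
    by_cases hx1 : x = 1
    · subst hx1
      cases flag <;> simp [isUnitLoopA, ih]
    · by_cases hx0 : x = 0
      · subst hx0
        simp [isUnitLoopA, ih]
      · simp [isUnitLoopA, hx0, hx1]

-- With all elements in {0,1}, the sum equals the number of ones.
theorem sum_eq_count (xs : List Int)
    (h : xs.all (fun x => x == 0 || x == 1) = true) :
    xs.sum = (xs.count 1 : Int) := by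
  induction xs with
  | nil => simp
  | cons x rest ih =>
    simp only [List.all_cons, Bool.and_eq_true, beq_iff_eq, Bool.or_eq_true] at h
    rcases h with ⟨hx, hrest⟩
    rcases hx with h0 | h1
    · subst h0; simp [ih hrest]
    · subst h1; simp [ih hrest]; ring

-- ===== VERDICT (by name: the statement is the Claim_ definition above) =====
theorem is_unit_spec : Claim_equal_is_unit := by
  intro xs _
  unfold Spec_is_unit is_unit is_unit_alt
  rw [isUnitLoopA_eq]
  by_cases h : xs.all (fun x => x == 0 || x == 1) = true
  · simp [h, sum_eq_count xs h]
  · simp [h]
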